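-- pv_equiv track=rewrite | github.com/cloudcomputingtaskb/Mirroring | Mapred.py | find_highest_flights
-- ===== SOURCE A (Python) =====
-- def find_highest_flights(reduced_data):
--     #  Set initial values for variables
--     highest_passenger_group = []
--     highest_flights_count = 0
--
--     for kv_pairs in reduced_data:
--         for kv_pair in kv_pairs:
--             _, value = kv_pair
--             # Find the highest value in key-value pairs
--             if value > highest_flights_count:
--                 highest_passenger_group = [kv_pair]
--                 highest_flights_count = value
--             # If there are multiple passengers with the maximum value
--             elif value == highest_flights_count:
--                 highest_passenger_group.append(kv_pair)
--
--     return highest_passenger_group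
-- ===== SOURCE B (Python) =====
-- def find_highest_flights(reduced_data):
--     flat = [kv for kvs in reduced_data for kv in kvs]
--     max_count = max([0] + [v for _, v in flat])
--     return [kv for kv in flat if kv[1] == max_count]
-- ===== Notes on version B (the rewrite author's own statement) =====
-- stated objective: simpler
-- what changed: Replaced the single stateful scan that rebuilds/extends the running-best list with a two-phase flatten -> compute max (floored at 0, mirroring the counter's initial value) -> filter pass.
import Mathlib
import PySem

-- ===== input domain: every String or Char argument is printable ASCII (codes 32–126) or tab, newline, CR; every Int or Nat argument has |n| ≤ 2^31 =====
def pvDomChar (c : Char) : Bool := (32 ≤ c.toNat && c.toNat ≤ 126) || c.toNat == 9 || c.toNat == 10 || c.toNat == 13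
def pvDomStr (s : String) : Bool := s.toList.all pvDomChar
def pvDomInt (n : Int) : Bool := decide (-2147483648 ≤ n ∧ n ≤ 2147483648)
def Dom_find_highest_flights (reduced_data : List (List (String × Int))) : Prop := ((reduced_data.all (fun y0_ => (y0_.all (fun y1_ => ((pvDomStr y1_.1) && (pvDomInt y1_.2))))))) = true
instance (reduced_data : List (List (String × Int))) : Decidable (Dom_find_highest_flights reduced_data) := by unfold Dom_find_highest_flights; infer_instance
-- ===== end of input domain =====

-- ===== PORT A =====
-- B replaces A's single stateful scan by flatten -> max (floored at 0) -> filter; same result, simpler.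
def find_highest_flights (reduced_data : List (List (String × Int))) : List (String × Int) :=
  (reduced_data.foldl (fun st kvs =>
    kvs.foldl (fun (st : List (String × Int) × Int) kv =>
      if kv.2 > st.2 then ([kv], kv.2)
      else if kv.2 = st.2 then (st.1 ++ [kv], st.2)
      else st) st) (([] : List (String × Int)), (0 : Int))).1

-- ===== PORT B =====
def find_highest_flights_alt (reduced_data : List (List (String × Int))) : List (String × Int) :=
  let flat := reduced_data.flatMap id
  let max_count := (flat.map Prod.snd).foldl max (0 : Int)  -- max([0] + values)
  flat.filter (fun kv => kv.2 == max_count)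

-- ===== PRECONDITION & SPEC =====
def Spec_find_highest_flights (reduced_data : List (List (String × Int))) (out : List (String × Int)) : Prop := out = find_highest_flights_alt reduced_data
instance (reduced_data : List (List (String × Int))) (out : List (String × Int)) : Decidable (Spec_find_highest_flights reduced_data out) := by unfold Spec_find_highest_flights; infer_instance

-- ===== CLAIM (what is proved, stated in full; the proofs are below) =====
def Claim_equal_find_highest_flights : Prop := ∀ (reduced_data : List (List (String × Int))), Dom_find_highest_flights reduced_data → Spec_find_highest_flights reduced_data (find_highest_flights reduced_data)

-- ===== LEMMAS AND PROOFS =====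

-- ===== VERDICT (by name: the statement is the Claim_ definition above) =====

def pvStep (st : List (String × Int) × Int) (kv : String × Int) : List (String × Int) × Int :=
  if kv.2 > st.2 then ([kv], kv.2)
  else if kv.2 = st.2 then (st.1 ++ [kv], st.2)
  else st

def pvM (c : Int) (xs : List (String × Int)) : Int := xs.foldl (fun m kv => max m kv.2) c

def pvG (acc : List (String × Int)) (c : Int) (xs : List (String × Int)) : List (String × Int) :=
  if c = pvM c xs then acc ++ xs.filter (fun kv => kv.2 == pvM c xs)
  else xs.filter (fun kv => kv.2 == pvM c xs)

theorem pvM_cons (c : Int) (kv : String × Int) (xs : List (String × Int)) :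
    pvM c (kv :: xs) = pvM (max c kv.2) xs := rfl

theorem pvM_le (c : Int) (xs : List (String × Int)) : c ≤ pvM c xs := by
  induction xs generalizing c with
  | nil => exact le_refl c
  | cons kv rest ih =>
    have := ih (max c kv.2)
    exact le_trans (le_max_left c kv.2) this

theorem pvFold_eq (xs : List (String × Int)) (acc : List (String × Int)) (c : Int) :
    xs.foldl pvStep (acc, c) = (pvG acc c xs, pvM c xs) := by
  induction xs generalizing acc c with
  | nil => simp [pvG, pvM]
  | cons kv rest ih =>
    by_cases h1 : kv.2 > c
    · have hstep : pvStep (acc, c) kv = ([kv], kv.2) := by simp [pvStep, h1]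
      have hmax : max c kv.2 = kv.2 := max_eq_right (le_of_lt h1)
      have hMc : pvM c (kv :: rest) = pvM kv.2 rest := by rw [pvM_cons, hmax]
      rw [List.foldl_cons, hstep, ih]
      have hle : kv.2 ≤ pvM kv.2 rest := pvM_le _ _
      have hne : ¬ (c = pvM kv.2 rest) := by
        intro h; rw [h] at h1; exact absurd hle (not_le_of_gt h1)
      simp only [pvG, hMc, List.filter_cons]
      rw [if_neg hne]
      by_cases h2 : kv.2 = pvM kv.2 rest
      · rw [if_pos h2, if_pos (beq_iff_eq.mpr h2)]; rfl
      · rw [if_neg h2, if_neg (by simpa using h2)]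
    · by_cases h2 : kv.2 = c
      · have hstep : pvStep (acc, c) kv = (acc ++ [kv], c) := by simp [pvStep, h2]
        have hmax : max c kv.2 = c := by rw [h2]; exact max_self c
        have hMc : pvM c (kv :: rest) = pvM c rest := by rw [pvM_cons, hmax]
        rw [List.foldl_cons, hstep, ih]
        simp only [pvG, hMc, List.filter_cons]
        by_cases h3 : c = pvM c rest
        · have hb : (kv.2 == pvM c rest) = true := beq_iff_eq.mpr (h2.trans h3)
          rw [if_pos h3, if_pos h3, hb, if_pos rfl]
          simp
        · have hne : ¬ (kv.2 = pvM c rest) := by rw [h2]; exact h3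
          rw [if_neg h3, if_neg h3, if_neg (by simpa using hne)]
      · have h3 : kv.2 < c := lt_of_le_of_ne (not_lt.mp h1) h2
        have hstep : pvStep (acc, c) kv = (acc, c) := by simp [pvStep, h2]; omega
        have hmax : max c kv.2 = c := max_eq_left (le_of_lt h3)
        have hMc : pvM c (kv :: rest) = pvM c rest := by rw [pvM_cons, hmax]
        rw [List.foldl_cons, hstep, ih]
        have hne : ¬ (kv.2 = pvM c rest) := by
          intro h; rw [h] at h3
          exact absurd (pvM_le c rest) (not_le_of_gt h3)
        have hf : (kv :: rest).filter (fun kv => kv.2 == pvM c rest)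
            = rest.filter (fun kv => kv.2 == pvM c rest) := by
          simp [hne]
        simp only [pvG, hMc, hf]

theorem find_highest_flights_spec : Claim_equal_find_highest_flights := by
  intro rd _
  unfold Spec_find_highest_flights find_highest_flights find_highest_flights_alt
  have hA : rd.foldl (fun st kvs =>
      kvs.foldl (fun (st : List (String × Int) × Int) kv =>
        if kv.2 > st.2 then ([kv], kv.2)
        else if kv.2 = st.2 then (st.1 ++ [kv], st.2)
        else st) st) (([] : List (String × Int)), (0 : Int))
      = (rd.flatMap id).foldl pvStep (([] : List (String × Int)), (0 : Int)) := by
    rw [List.foldl_flatMap]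
    rfl
  rw [hA, pvFold_eq]
  have hM : pvM 0 (rd.flatMap id) = ((rd.flatMap id).map Prod.snd).foldl max (0 : Int) := by
    unfold pvM; rw [List.foldl_map]
  simp only [pvG, hM]
  split <;> simp
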